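-- pv_equiv track=rewrite | github.com/yuchigong957/Similar | cut_onnx.py | _collect_path_nodes
-- ===== SOURCE A (Python) =====
-- from collections import defaultdict, deque
-- from typing import Dict, List, Sequence, Set
--
-- def _collect_path_nodes(
--     adjacency: Dict[str, Set[str]], start_nodes: Sequence[str], end_nodes: Sequence[str]
-- ) -> Set[str]:
--     """Return all nodes on every path from ``start_nodes`` to ``end_nodes``.
--
--     A breadth-first traversal ensures we explore the full downstream area
--     while avoiding infinite loops.  If no path is found, a ``ValueError``
--     with helpful diagnostics is raised so the caller can adjust the node
--     names.
--     """
--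
--     end_set = set(end_nodes)
--     visited: Set[str] = set()
--     reachable: Set[str] = set()
--
--     queue = deque(start_nodes)
--     while queue:
--         current = queue.popleft()
--         if current in visited:
--             continue
--         visited.add(current)
--         reachable.add(current)
--
--         for nxt in adjacency.get(current, set()):
--             queue.append(nxt)
--
--     if not end_set.intersection(reachable):
--         raise ValueError(
--             "[ERROR] 没找到从 {} 到 {} 的路径，请检查 unified_names 后的节点名是否正确，或者这些节点之间本来无连接。".format(
--                 start_nodes, end_nodes
--             )
--         )
--
--     # Trim unreachable tails that are not on the path to the requested ends.
--     reverse_adj: Dict[str, Set[str]] = defaultdict(set)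
--     for producer, consumers in adjacency.items():
--         for consumer in consumers:
--             reverse_adj[consumer].add(producer)
--
--     nodes_on_path: Set[str] = set()
--     queue = deque(end_nodes)
--     while queue:
--         current = queue.popleft()
--         if current not in reachable or current in nodes_on_path:
--             continue
--         nodes_on_path.add(current)
--         for parent in reverse_adj.get(current, set()):
--             queue.append(parent)
--
--     return nodes_on_path
-- ===== SOURCE B (Python) =====
-- def _collect_path_nodes(adjacency, start_nodes, end_nodes):
--     """Chaotic-iteration fixpoints over the raw edge list: no queue, no visited
--     bookkeeping, no reverse-adjacency map.  Forward: grow `reachable` by adding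
--     the consumers of every already-reachable producer until a full sweep changes
--     nothing.  Backward: grow `nodes_on_path` by adding every reachable producer
--     that feeds a node already on the path, again to a fixpoint."""
--
--     reachable = set(start_nodes)
--     changed = True
--     while changed:
--         changed = False
--         for producer, consumers in adjacency.items():
--             if producer in reachable:
--                 for nxt in consumers:
--                     if nxt not in reachable:
--                         reachable.add(nxt)
--                         changed = True
--
--     if not reachable.intersection(end_nodes):
--         raise ValueError(
--             "[ERROR] 没找到从 {} 到 {} 的路径，请检查 unified_names 后的节点名是否正确，或者这些节点之间本来无连接。".format(
--                 start_nodes, end_nodes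
--             )
--         )
--
--     nodes_on_path = {node for node in end_nodes if node in reachable}
--     changed = True
--     while changed:
--         changed = False
--         for producer, consumers in adjacency.items():
--             if (
--                 producer in reachable
--                 and producer not in nodes_on_path
--                 and any(c in nodes_on_path for c in consumers)
--             ):
--                 nodes_on_path.add(producer)
--                 changed = True
--
--     return nodes_on_path
-- ===== Notes on version B (the rewrite author's own statement) =====
-- stated objective: alternative
-- what changed: Replaces A's two BFS traversals (deque + visited set, plus a reverse-adjacency map built for the backward pass) with chaotic-iteration fixpoints over the raw edge list: repeatedly sweep adjacency.items(), adding consumers of reachable producers (forward) and reachable producers that feed a node already on the path (backward), until a full sweep changes nothing; no queue and no reverse adjacency are ever built, trading A's O(V+E) traversals for O(V*E) worst-case sweeps.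
import Mathlib
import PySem

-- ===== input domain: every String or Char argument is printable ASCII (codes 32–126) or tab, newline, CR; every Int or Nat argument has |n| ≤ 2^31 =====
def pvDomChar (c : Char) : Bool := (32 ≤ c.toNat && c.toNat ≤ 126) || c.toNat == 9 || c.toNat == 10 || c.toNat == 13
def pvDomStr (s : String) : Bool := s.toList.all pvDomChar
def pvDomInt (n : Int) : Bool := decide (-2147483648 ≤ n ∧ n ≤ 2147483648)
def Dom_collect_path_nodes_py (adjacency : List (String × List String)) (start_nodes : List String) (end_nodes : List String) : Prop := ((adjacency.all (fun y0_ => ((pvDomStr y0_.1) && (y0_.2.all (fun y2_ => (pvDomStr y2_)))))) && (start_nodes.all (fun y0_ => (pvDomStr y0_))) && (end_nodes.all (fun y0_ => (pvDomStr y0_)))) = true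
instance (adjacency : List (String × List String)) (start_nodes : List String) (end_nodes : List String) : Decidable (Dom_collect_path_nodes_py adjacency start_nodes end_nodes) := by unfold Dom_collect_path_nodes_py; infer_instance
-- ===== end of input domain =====

-- B replaces A's two BFS traversals (deque + visited set + reverse-adjacency map) by
-- chaotic-iteration fixpoints over the raw edge list (sweep until nothing changes);
-- no queue and no reverse adjacency are built (objective: alternative).
-- Python returns a set (unordered); both ports present it as its sorted element list.


-- ===== PORT A =====
-- Termination scaffolding shared by both ports: every node either traversal can ever
-- add lies in pvU (start/end nodes, dict keys and all consumers), so the `∈ U` guards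
-- inside the loops below never fire on the ports' actual data — they only make the
-- recursions well-founded.
def pvU (adjacency : List (String × List String)) (start_nodes : List String)
    (end_nodes : List String) : List String :=
  start_nodes ++ end_nodes ++
    (PySem.Dict.ofList adjacency).items.flatMap (fun pc => pc.1 :: pc.2)

lemma pvFiltLe (U s s' : List String) (hsub : ∀ x, x ∈ s → x ∈ s') :
    (U.filter (fun u => !decide (u ∈ s'))).length ≤ (U.filter (fun u => !decide (u ∈ s))).length := by
  induction U with
  | nil => simp
  | cons u U ih =>
    by_cases h : u ∈ s'
    · by_cases h2 : u ∈ s <;> simp [h, h2] <;> omega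
    · have : u ∉ s := fun hm => h (hsub u hm)
      simp [h, this]; omega

lemma pvFiltLt' (U s s' : List String) (hsub : ∀ x, x ∈ s → x ∈ s')
    (c : String) (hcU : c ∈ U) (hc1 : c ∉ s) (hc2 : c ∈ s') :
    (U.filter (fun u => !decide (u ∈ s'))).length < (U.filter (fun u => !decide (u ∈ s))).length := by
  induction U with
  | nil => cases hcU
  | cons u U ih =>
    rcases List.mem_cons.mp hcU with rfl | hcU'
    · have le := pvFiltLe U s s' hsub
      simp [hc1, hc2]; omega
    · have lt := ih hcU'
      by_cases h : u ∈ s'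
      · by_cases h2 : u ∈ s <;> simp [h, h2] <;> omega
      · have : u ∉ s := fun hm => h (hsub u hm)
        simp [h, this]; omega

-- Port of A's `while queue:` loops (deque + visited-skip); `seen` doubles as the
-- insertion-ordered result set; `ok` is A's `current in reachable` test of the
-- backward loop (constantly true in the forward loop).
def pvQueueBFS (U : List String) (nbrs : String → List String) (ok : String → Bool) :
    List String → List String → List String
  | [], _ => []
  | c :: q, seen =>
    if c ∈ U ∧ ok c = true ∧ c ∉ seen then
      c :: pvQueueBFS U nbrs ok (q ++ nbrs c) (seen ++ [c])
    else
      pvQueueBFS U nbrs ok q seen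
termination_by q seen => ((U.filter (fun u => !decide (u ∈ seen))).length, q.length)
decreasing_by
  · exact Prod.Lex.left _ _ (pvFiltLt' U seen (seen ++ [c]) (fun x hx => List.mem_append_left _ hx)
      c (by tauto) (by tauto) (by simp))
  · exact Prod.Lex.right _ (by simp)

-- Port of A's reverse-adjacency build (`reverse_adj[consumer].add(producer)`).
def pvBuildRev (adjacency : List (String × List String)) : PySem.Dict String (List String) :=
  (PySem.Dict.ofList adjacency).items.foldl
    (fun r pc => pc.2.foldl (fun r c => r.insert c (PySem.Set.add (r.getD c []) pc.1)) r)
    PySem.Dict.empty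

-- A; the ValueError branch (no end node reachable) is excluded by Pre_ below.
def collect_path_nodes_py (adjacency : List (String × List String)) (start_nodes : List String)
    (end_nodes : List String) : List String :=
  let adj := PySem.Dict.ofList adjacency
  let U := pvU adjacency start_nodes end_nodes
  let reachable := pvQueueBFS U (fun c => adj.getD c []) (fun _ => true) start_nodes []
  let rev := pvBuildRev adjacency
  let onPath := pvQueueBFS U (fun c => rev.getD c []) (fun c => decide (c ∈ reachable)) end_nodes []
  PySem.List.sorted onPath (fun x => x) false

-- ===== PORT B =====
-- Port of B's inner `for nxt in consumers:` loop of the forward sweep.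
def pvAddConsumers (U : List String) (st : List String × Bool) (cs : List String) :
    List String × Bool :=
  cs.foldl (fun st c => if c ∈ U ∧ c ∉ st.1 then (st.1 ++ [c], true) else st) st

-- One forward sweep of B's `for producer, consumers in adjacency.items():` body.
def pvSweepF (U : List String) (items : List (String × List String)) (st : List String × Bool) :
    List String × Bool :=
  items.foldl (fun st pc => if pc.1 ∈ st.1 then pvAddConsumers U st pc.2 else st) st

-- One backward sweep (producer joins when reachable, not yet on path, feeds the path).
def pvSweepB (U : List String) (items : List (String × List String)) (reachable : List String)
    (st : List String × Bool) : List String × Bool :=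
  items.foldl (fun st pc =>
    if pc.1 ∈ U ∧ pc.1 ∈ reachable ∧ pc.1 ∉ st.1 ∧ pc.2.any (fun c => decide (c ∈ st.1)) then
      (st.1 ++ [pc.1], true)
    else st) st

-- Growth facts (needed for the drivers' termination): a sweep only appends fresh
-- U-elements, and reports `changed` iff it appended something.
lemma pvAddConsumers_grow (U : List String) (cs : List String) :
    ∀ st : List String × Bool, ∃ ds, (pvAddConsumers U st cs).1 = st.1 ++ ds ∧
      (∀ x ∈ ds, x ∈ U ∧ x ∉ st.1) ∧ ds.Nodup ∧
      (pvAddConsumers U st cs).2 = (st.2 || !ds.isEmpty) := by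
  induction cs with
  | nil => intro st; exact ⟨[], by simp [pvAddConsumers]⟩
  | cons c cs ih =>
    intro st
    by_cases h : c ∈ U ∧ c ∉ st.1
    · obtain ⟨ds, h1, h2, h3, h4⟩ := ih (st.1 ++ [c], true)
      refine ⟨c :: ds, ?_, ?_, ?_, ?_⟩
      · simpa [pvAddConsumers, h, List.append_assoc] using h1
      · intro x hx
        rcases List.mem_cons.mp hx with rfl | hx'
        · exact h
        · have := h2 x hx'
          simp at this
          exact ⟨this.1, this.2.1⟩
      · refine List.nodup_cons.mpr ⟨fun hc => ?_, h3⟩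
        have := h2 c hc; simp at this
      · simpa [pvAddConsumers, h] using h4
    · obtain ⟨ds, h1, h2, h3, h4⟩ := ih st
      exact ⟨ds, by simpa [pvAddConsumers, h] using h1, h2, h3,
        by simpa [pvAddConsumers, h] using h4⟩

lemma pvSweepF_grow (U : List String) (items : List (String × List String)) :
    ∀ st : List String × Bool, ∃ ds, (pvSweepF U items st).1 = st.1 ++ ds ∧
      (∀ x ∈ ds, x ∈ U ∧ x ∉ st.1) ∧ ds.Nodup ∧
      (pvSweepF U items st).2 = (st.2 || !ds.isEmpty) := by
  induction items with
  | nil => intro st; exact ⟨[], by simp [pvSweepF]⟩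
  | cons pc items ih =>
    intro st
    by_cases h : pc.1 ∈ st.1
    · obtain ⟨ds1, g1, g2, g3, g4⟩ := pvAddConsumers_grow U pc.2 st
      obtain ⟨ds2, h1, h2, h3, h4⟩ := ih (pvAddConsumers U st pc.2)
      refine ⟨ds1 ++ ds2, ?_, ?_, ?_, ?_⟩
      · simpa [pvSweepF, h, g1, List.append_assoc] using h1
      · intro x hx
        rcases List.mem_append.mp hx with hx' | hx'
        · exact g2 x hx'
        · have := h2 x hx'
          rw [g1] at this
          simp at this
          exact ⟨this.1, this.2.1⟩
      · refine List.Nodup.append g3 h3 (fun x hx1 hx2 => ?_)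
        have := h2 x hx2
        rw [g1] at this
        exact (this.2 (List.mem_append_right _ hx1)).elim
      · have : (pvSweepF U (pc :: items) st).2 = (pvSweepF U items (pvAddConsumers U st pc.2)).2 := by
          simp [pvSweepF, h]
        rw [this, h4, g4]
        cases ds1 <;> cases ds2 <;> simp
    · obtain ⟨ds, h1, h2, h3, h4⟩ := ih st
      exact ⟨ds, by simpa [pvSweepF, h] using h1, h2, h3, by simpa [pvSweepF, h] using h4⟩

lemma pvSweepB_grow (U : List String) (items : List (String × List String)) (R : List String) :
    ∀ st : List String × Bool, ∃ ds, (pvSweepB U items R st).1 = st.1 ++ ds ∧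
      (∀ x ∈ ds, x ∈ U ∧ x ∉ st.1) ∧ ds.Nodup ∧
      (pvSweepB U items R st).2 = (st.2 || !ds.isEmpty) := by
  induction items with
  | nil => intro st; exact ⟨[], by simp [pvSweepB]⟩
  | cons pc items ih =>
    intro st
    have step : pvSweepB U (pc :: items) R st = pvSweepB U items R
        (if pc.1 ∈ U ∧ pc.1 ∈ R ∧ pc.1 ∉ st.1 ∧ pc.2.any (fun c => decide (c ∈ st.1)) then
          (st.1 ++ [pc.1], true) else st) := rfl
    by_cases h : pc.1 ∈ U ∧ pc.1 ∈ R ∧ pc.1 ∉ st.1 ∧ pc.2.any (fun c => decide (c ∈ st.1)) = true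
    · rw [step, if_pos h]
      obtain ⟨ds, h1, h2, h3, h4⟩ := ih (st.1 ++ [pc.1], true)
      refine ⟨pc.1 :: ds, ?_, ?_, ?_, ?_⟩
      · rw [h1]; simp
      · intro x hx
        rcases List.mem_cons.mp hx with rfl | hx'
        · exact ⟨h.1, h.2.2.1⟩
        · have := h2 x hx'; simp at this; exact ⟨this.1, this.2.1⟩
      · refine List.nodup_cons.mpr ⟨fun hc => ?_, h3⟩
        have := h2 pc.1 hc; simp at this
      · rw [h4]; simp
    · rw [step, if_neg h]
      exact ih st

-- Port of B's forward `while changed:` loop: sweep to a fixpoint.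
def pvSatF (U : List String) (items : List (String × List String)) (r : List String) :
    List String :=
  if (pvSweepF U items (r, false)).2 = true then
    pvSatF U items (pvSweepF U items (r, false)).1
  else (pvSweepF U items (r, false)).1
termination_by (U.filter (fun u => !decide (u ∈ r))).length
decreasing_by
  · rename_i h
    obtain ⟨ds, h1, h2, h3, h4⟩ := pvSweepF_grow U items (r, false)
    rw [h4] at h
    have hds : ds ≠ [] := by cases ds <;> simp_all
    obtain ⟨c, hc⟩ := List.exists_mem_of_ne_nil ds hds
    exact pvFiltLt' U r (pvSweepF U items (r, false)).1
      (fun x hx => by rw [h1]; exact List.mem_append_left _ hx)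
      c (h2 c hc).1 (h2 c hc).2 (by rw [h1]; exact List.mem_append_right _ hc)

-- Port of B's backward `while changed:` loop.
def pvSatB (U : List String) (items : List (String × List String)) (R : List String)
    (r : List String) : List String :=
  if (pvSweepB U items R (r, false)).2 = true then
    pvSatB U items R (pvSweepB U items R (r, false)).1
  else (pvSweepB U items R (r, false)).1
termination_by (U.filter (fun u => !decide (u ∈ r))).length
decreasing_by
  · rename_i h
    obtain ⟨ds, h1, h2, h3, h4⟩ := pvSweepB_grow U items R (r, false)
    rw [h4] at h
    have hds : ds ≠ [] := by cases ds <;> simp_all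
    obtain ⟨c, hc⟩ := List.exists_mem_of_ne_nil ds hds
    exact pvFiltLt' U r (pvSweepB U items R (r, false)).1
      (fun x hx => by rw [h1]; exact List.mem_append_left _ hx)
      c (h2 c hc).1 (h2 c hc).2 (by rw [h1]; exact List.mem_append_right _ hc)

-- B; same ValueError condition, excluded by Pre_ below.
def collect_path_nodes_py_alt (adjacency : List (String × List String)) (start_nodes : List String)
    (end_nodes : List String) : List String :=
  let items := (PySem.Dict.ofList adjacency).items
  let U := pvU adjacency start_nodes end_nodes
  let reachable := pvSatF U items (PySem.Set.ofList start_nodes)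
  let seed := PySem.Set.ofList (end_nodes.filter (fun e => decide (e ∈ reachable)))
  let onPath := pvSatB U items reachable seed
  PySem.List.sorted onPath (fun x => x) false

-- ===== PRECONDITION & SPEC =====
-- Pre_ excludes exactly the inputs on which Python A (and B) raises ValueError: those
-- where no end node is reachable from the start nodes.  Reachability is stated as the
-- mathematical successor-closure of the start set (the |pvU|-fold iterate of one-step
-- expansion on finite sets), independent of both ports' traversals.
def Pre_collect_path_nodes_py (adjacency : List (String × List String)) (start_nodes : List String)
    (end_nodes : List String) : Prop :=
  ∃ e ∈ end_nodes,
    e ∈ (fun S : Finset String =>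
          S ∪ S.biUnion (fun c => ((PySem.Dict.ofList adjacency).getD c []).toFinset))^[
            (pvU adjacency start_nodes end_nodes).length] start_nodes.toFinset
instance (adjacency : List (String × List String)) (start_nodes : List String) (end_nodes : List String) : Decidable (Pre_collect_path_nodes_py adjacency start_nodes end_nodes) := by unfold Pre_collect_path_nodes_py; infer_instance
def pvWitness_collect_path_nodes_py : (List (String × List String)) × List String × List String :=
  ([("a", ["b"])], ["a"], ["b"])

def Spec_collect_path_nodes_py (adjacency : List (String × List String)) (start_nodes : List String) (end_nodes : List String) (out : List String) : Prop := out = collect_path_nodes_py_alt adjacency start_nodes end_nodes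
instance (adjacency : List (String × List String)) (start_nodes : List String) (end_nodes : List String) (out : List String) : Decidable (Spec_collect_path_nodes_py adjacency start_nodes end_nodes out) := by unfold Spec_collect_path_nodes_py; infer_instance

-- ===== CLAIM (what is proved, stated in full; the proofs are below) =====
def Claim_equal_collect_path_nodes_py : Prop := ∀ (adjacency : List (String × List String)) (start_nodes : List String) (end_nodes : List String), Dom_collect_path_nodes_py adjacency start_nodes end_nodes → Pre_collect_path_nodes_py adjacency start_nodes end_nodes → Spec_collect_path_nodes_py adjacency start_nodes end_nodes (collect_path_nodes_py adjacency start_nodes end_nodes)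

-- ===== LEMMAS AND PROOFS =====

lemma pvQueue_sound (U : List String) (nbrs : String → List String) (ok : String → Bool)
    (P : String → Prop)
    (hstep : ∀ p, P p → ∀ y ∈ nbrs p, y ∈ U → ok y = true → P y) :
    ∀ q seen, (∀ x ∈ q, x ∈ U → ok x = true → P x) →
      ∀ x ∈ pvQueueBFS U nbrs ok q seen, P x := by
  intro q seen
  fun_induction pvQueueBFS U nbrs ok q seen with
  | case1 _ => simp
  | case2 c q seen h ih =>
    intro hq x hx
    rcases List.mem_cons.mp hx with rfl | hx'
    · exact hq x (List.mem_cons_self) h.1 h.2.1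
    · refine ih ?_ x hx'
      intro y hy hyU hyok
      rcases List.mem_append.mp hy with hy' | hy'
      · exact hq y (List.mem_cons_of_mem _ hy') hyU hyok
      · exact hstep c (hq c List.mem_cons_self h.1 h.2.1) y hy' hyU hyok
  | case3 c q seen h ih =>
    intro hq x hx
    exact ih (fun y hy => hq y (List.mem_cons_of_mem _ hy)) x hx
lemma pvQueue_mem (U : List String) (nbrs : String → List String) (ok : String → Bool) :
    ∀ q seen, ∀ x ∈ q, x ∈ U → ok x = true →
      x ∈ seen ∨ x ∈ pvQueueBFS U nbrs ok q seen := by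
  intro q seen
  fun_induction pvQueueBFS U nbrs ok q seen with
  | case1 seen => intro x hx; cases hx
  | case2 c q seen h ih =>
    intro x hx hxU hxok
    rcases List.mem_cons.mp hx with rfl | hx'
    · exact Or.inr List.mem_cons_self
    · rcases ih x (List.mem_append_left _ hx') hxU hxok with hs | ho
      · rcases List.mem_append.mp hs with hs' | hs'
        · exact Or.inl hs'
        · simp at hs'; subst hs'; exact Or.inr List.mem_cons_self
      · exact Or.inr (List.mem_cons_of_mem _ ho)
  | case3 c q seen h ih =>
    intro x hx hxU hxok
    rcases List.mem_cons.mp hx with rfl | hx'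
    · left
      by_contra hns
      exact h ⟨hxU, hxok, hns⟩
    · exact ih x hx' hxU hxok

lemma pvQueue_closed (U : List String) (nbrs : String → List String) (ok : String → Bool) :
    ∀ q seen,
      (∀ p ∈ seen, ∀ y ∈ nbrs p, y ∈ U → ok y = true → y ∈ seen ∨ y ∈ q) →
      ∀ p, (p ∈ seen ∨ p ∈ pvQueueBFS U nbrs ok q seen) → ∀ y ∈ nbrs p, y ∈ U → ok y = true →
        y ∈ seen ∨ y ∈ pvQueueBFS U nbrs ok q seen := by
  intro q seen
  fun_induction pvQueueBFS U nbrs ok q seen with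
  | case1 seen =>
    intro hI p hp y hy hyU hyok
    rcases hp with hp | hp
    · rcases hI p hp y hy hyU hyok with hs | hq
      · exact Or.inl hs
      · cases hq
    · cases hp
  | case2 c q seen h ih =>
    intro hI p hp y hy hyU hyok
    have hI' : ∀ p ∈ seen ++ [c], ∀ y ∈ nbrs p, y ∈ U → ok y = true →
        y ∈ seen ++ [c] ∨ y ∈ q ++ nbrs c := by
      intro p' hp' y' hy' hyU' hyok'
      rcases List.mem_append.mp hp' with hp'' | hp''
      · rcases hI p' hp'' y' hy' hyU' hyok' with hs | hq
        · exact Or.inl (List.mem_append_left _ hs)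
        · rcases List.mem_cons.mp hq with rfl | hq'
          · exact Or.inl (List.mem_append_right _ (by simp))
          · exact Or.inr (List.mem_append_left _ hq')
      · simp at hp''; subst hp''
        exact Or.inr (List.mem_append_right _ hy')
    have hp' : p ∈ seen ++ [c] ∨ p ∈ pvQueueBFS U nbrs ok (q ++ nbrs c) (seen ++ [c]) := by
      rcases hp with hp | hp
      · exact Or.inl (List.mem_append_left _ hp)
      · rcases List.mem_cons.mp hp with rfl | hp''
        · exact Or.inl (List.mem_append_right _ (by simp))
        · exact Or.inr hp''
    rcases ih hI' p hp' y hy hyU hyok with hs | ho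
    · rcases List.mem_append.mp hs with hs' | hs'
      · exact Or.inl hs'
      · simp at hs'; subst hs'; exact Or.inr List.mem_cons_self
    · exact Or.inr (List.mem_cons_of_mem _ ho)
  | case3 c q seen h ih =>
    intro hI p hp y hy hyU hyok
    refine ih ?_ p hp y hy hyU hyok
    intro p' hp' y' hy' hyU' hyok'
    rcases hI p' hp' y' hy' hyU' hyok' with hs | hq
    · exact Or.inl hs
    · rcases List.mem_cons.mp hq with rfl | hq'
      · left
        by_contra hns
        exact h ⟨hyU', hyok', hns⟩
      · exact Or.inr hq'

lemma pvQueue_fresh (U : List String) (nbrs : String → List String) (ok : String → Bool) :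
    ∀ q seen x, x ∈ pvQueueBFS U nbrs ok q seen → x ∉ seen ∧ x ∈ U ∧ ok x = true := by
  intro q seen
  fun_induction pvQueueBFS U nbrs ok q seen with
  | case1 seen => intro x hx; cases hx
  | case2 c q seen h ih =>
    intro x hx
    rcases List.mem_cons.mp hx with rfl | hx'
    · exact ⟨h.2.2, h.1, h.2.1⟩
    · have := ih x hx'
      refine ⟨fun hs => this.1 (List.mem_append_left _ hs), this.2⟩
  | case3 c q seen h ih => exact ih

lemma pvQueue_nodup (U : List String) (nbrs : String → List String) (ok : String → Bool) :
    ∀ q seen, (pvQueueBFS U nbrs ok q seen).Nodup := by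
  intro q seen
  fun_induction pvQueueBFS U nbrs ok q seen with
  | case1 seen => exact List.nodup_nil
  | case2 c q seen h ih =>
    refine List.nodup_cons.mpr ⟨fun hc => ?_, ih⟩
    exact (pvQueue_fresh U nbrs ok _ _ c hc).1 (List.mem_append_right _ (by simp))
  | case3 c q seen h ih => exact ih
-- `c` is a consumer of `p` in the dict iff some item pair records it.
lemma pvMemGetD_iff (adjacency : List (String × List String)) (p c : String) :
    c ∈ (PySem.Dict.ofList adjacency).getD p [] ↔
      ∃ cs, (p, cs) ∈ (PySem.Dict.ofList adjacency).items ∧ c ∈ cs := by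
  constructor
  · intro h
    cases hg : (PySem.Dict.ofList adjacency).get? p with
    | none => simp [PySem.Dict.getD, hg] at h
    | some cs =>
      refine ⟨cs, PySem.Dict.mem_items_of_get?_eq_some _ hg, ?_⟩
      simpa [PySem.Dict.getD, hg] using h
  · rintro ⟨cs, hmem, hc⟩
    rw [PySem.Dict.getD_of_mem_items _ hmem (PySem.Dict.nodup_keys_ofList adjacency) []]
    exact hc

-- Characterization of the reverse-adjacency dict A builds.
lemma pvBuildRevInner (p c x : String) (cs : List String) :
    ∀ d : PySem.Dict String (List String),
      x ∈ (cs.foldl (fun r c' => r.insert c' (PySem.Set.add (r.getD c' []) p)) d).getD c [] ↔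
        x ∈ d.getD c [] ∨ (x = p ∧ c ∈ cs) := by
  induction cs with
  | nil => intro d; simp
  | cons c' cs ih =>
    intro d
    rw [List.foldl_cons, ih]
    rw [PySem.Dict.getD_insert]
    by_cases hc : c = c'
    · subst hc
      simp [PySem.Set.mem_add]
      tauto
    · simp [hc]

lemma pvBuildRevOuter (c x : String) :
    ∀ (L : List (String × List String)) (d : PySem.Dict String (List String)),
      x ∈ (L.foldl (fun r pc => pc.2.foldl
            (fun r c' => r.insert c' (PySem.Set.add (r.getD c' []) pc.1)) r) d).getD c [] ↔
        x ∈ d.getD c [] ∨ ∃ pc ∈ L, pc.1 = x ∧ c ∈ pc.2 := by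
  intro L
  induction L with
  | nil => intro d; simp
  | cons pc L ih =>
    intro d
    rw [List.foldl_cons, ih, pvBuildRevInner]
    simp
    tauto

lemma pvMemRev_iff (adjacency : List (String × List String)) (c x : String) :
    x ∈ (pvBuildRev adjacency).getD c [] ↔
      c ∈ (PySem.Dict.ofList adjacency).getD x [] := by
  rw [pvBuildRev, pvBuildRevOuter, pvMemGetD_iff]
  simp [PySem.Dict.getD_empty]

-- Universe facts.
lemma pvU_start {adjacency start_nodes end_nodes} {x : String} (h : x ∈ start_nodes) :
    x ∈ pvU adjacency start_nodes end_nodes := by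
  unfold pvU; simp [h]

lemma pvU_end {adjacency start_nodes end_nodes} {x : String} (h : x ∈ end_nodes) :
    x ∈ pvU adjacency start_nodes end_nodes := by
  unfold pvU; simp [h]

lemma pvU_item {adjacency start_nodes end_nodes} {pc : String × List String}
    (h : pc ∈ (PySem.Dict.ofList adjacency).items) :
    pc.1 ∈ pvU adjacency start_nodes end_nodes ∧
      ∀ c ∈ pc.2, c ∈ pvU adjacency start_nodes end_nodes := by
  unfold pvU
  constructor
  · simp only [List.mem_append, List.mem_flatMap]
    exact Or.inr ⟨pc, h, by simp⟩
  · intro c hc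
    simp only [List.mem_append, List.mem_flatMap]
    exact Or.inr ⟨pc, h, by simp [hc]⟩

lemma pvU_consumer {adjacency start_nodes end_nodes} {p c : String}
    (h : c ∈ (PySem.Dict.ofList adjacency).getD p []) :
    c ∈ pvU adjacency start_nodes end_nodes ∧ p ∈ pvU adjacency start_nodes end_nodes := by
  obtain ⟨cs, hmem, hc⟩ := (pvMemGetD_iff adjacency p c).mp h
  have := pvU_item (adjacency := adjacency) (start_nodes := start_nodes)
    (end_nodes := end_nodes) hmem
  exact ⟨this.2 c hc, this.1⟩

-- Forward reachability (mathematical closure of the start set under the edge relation).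
inductive pvReachF (adj : PySem.Dict String (List String)) (S : List String) : String → Prop
  | base (x : String) (hx : x ∈ S) : pvReachF adj S x
  | step (p c : String) (hp : pvReachF adj S p) (hc : c ∈ adj.getD p []) : pvReachF adj S c

-- Backward reachability towards the ends, through R-nodes only.
inductive pvReachB (adj : PySem.Dict String (List String)) (R E : List String) : String → Prop
  | base (x : String) (hx : x ∈ E) (hr : x ∈ R) : pvReachB adj R E x
  | step (p c : String) (hc : pvReachB adj R E c) (hp : p ∈ R) (he : c ∈ adj.getD p []) :
      pvReachB adj R E p

lemma pvReachB_congr {adj : PySem.Dict String (List String)} {R R' E : List String}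
    (h : ∀ y, y ∈ R ↔ y ∈ R') {x : String} (hx : pvReachB adj R E x) : pvReachB adj R' E x := by
  induction hx with
  | base x hx hr => exact pvReachB.base x hx ((h x).mp hr)
  | step p c hc hp he ih => exact pvReachB.step p c ih ((h p).mp hp) he
-- A's forward BFS visits exactly the reachable nodes.
lemma pvAFwd (adjacency : List (String × List String)) (start_nodes end_nodes : List String)
    (x : String) :
    x ∈ pvQueueBFS (pvU adjacency start_nodes end_nodes)
        (fun c => (PySem.Dict.ofList adjacency).getD c []) (fun _ => true) start_nodes [] ↔
      pvReachF (PySem.Dict.ofList adjacency) start_nodes x := by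
  constructor
  · intro h
    refine pvQueue_sound _ _ _ (pvReachF (PySem.Dict.ofList adjacency) start_nodes)
      (fun p hp y hy _ _ => pvReachF.step p y hp hy) start_nodes []
      (fun x hx _ _ => pvReachF.base x hx) x h
  · intro h
    induction h with
    | base z hz =>
      rcases pvQueue_mem (pvU adjacency start_nodes end_nodes)
        (fun c => (PySem.Dict.ofList adjacency).getD c []) (fun _ => true)
        start_nodes [] z hz (pvU_start hz) rfl with hs | ho
      · cases hs
      · exact ho
    | step p c hp hc ih =>
      have := pvQueue_closed (pvU adjacency start_nodes end_nodes)
        (fun c => (PySem.Dict.ofList adjacency).getD c []) (fun _ => true) start_nodes []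
        (by intro p hp; cases hp) p (Or.inr ih) c hc
        (pvU_consumer (start_nodes := start_nodes) (end_nodes := end_nodes) hc).1 rfl
      rcases this with hs | ho
      · cases hs
      · exact ho

-- A's constrained backward BFS visits exactly the R-backward-reachable nodes.
lemma pvABwd (adjacency : List (String × List String)) (start_nodes end_nodes : List String)
    (R : List String) (x : String) :
    x ∈ pvQueueBFS (pvU adjacency start_nodes end_nodes)
        (fun c => (pvBuildRev adjacency).getD c [])
        (fun c => decide (c ∈ R)) end_nodes [] ↔
      pvReachB (PySem.Dict.ofList adjacency) R end_nodes x := by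
  constructor
  · intro h
    refine pvQueue_sound _ _ _ (pvReachB (PySem.Dict.ofList adjacency) R end_nodes)
      ?_ end_nodes [] (fun x hx _ hok => pvReachB.base x hx (of_decide_eq_true hok)) x h
    intro c hc y hy _ hok
    exact pvReachB.step y c hc (of_decide_eq_true hok) ((pvMemRev_iff adjacency c y).mp hy)
  · intro h
    induction h with
    | base z hz hr =>
      rcases pvQueue_mem (pvU adjacency start_nodes end_nodes)
        (fun c => (pvBuildRev adjacency).getD c []) (fun c => decide (c ∈ R))
        end_nodes [] z hz (pvU_end hz) (decide_eq_true hr) with hs | ho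
      · cases hs
      · exact ho
    | step p c hc hp he ih =>
      have := pvQueue_closed (pvU adjacency start_nodes end_nodes)
        (fun c => (pvBuildRev adjacency).getD c [])
        (fun c => decide (c ∈ R)) end_nodes []
        (by intro p hp; cases hp) c (Or.inr ih) p ((pvMemRev_iff adjacency c p).mpr he)
        (pvU_consumer (start_nodes := start_nodes) (end_nodes := end_nodes) he).2
        (decide_eq_true hp)
      rcases this with hs | ho
      · cases hs
      · exact ho
-- Sweeps preserve any predicate closed under the adding rule.
lemma pvAddConsumers_sound (U : List String) (P : String → Prop) (cs : List String) :
    ∀ st : List String × Bool, (∀ c ∈ cs, P c) → (∀ x ∈ st.1, P x) →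
      ∀ x ∈ (pvAddConsumers U st cs).1, P x := by
  induction cs with
  | nil => intro st _ hst; simpa [pvAddConsumers] using hst
  | cons c cs ih =>
    intro st hcs hst
    have step : pvAddConsumers U st (c :: cs) = pvAddConsumers U
        (if c ∈ U ∧ c ∉ st.1 then (st.1 ++ [c], true) else st) cs := rfl
    rw [step]
    by_cases h : c ∈ U ∧ c ∉ st.1
    · rw [if_pos h]
      refine ih _ (fun c' hc' => hcs c' (List.mem_cons_of_mem _ hc')) ?_
      intro x hx
      rcases List.mem_append.mp hx with hx' | hx'
      · exact hst x hx'
      · simp at hx'; subst hx'; exact hcs x List.mem_cons_self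
    · rw [if_neg h]
      exact ih st (fun c' hc' => hcs c' (List.mem_cons_of_mem _ hc')) hst

lemma pvSweepF_sound (U : List String) (P : String → Prop) :
    ∀ items : List (String × List String),
      (∀ pc ∈ items, ∀ c ∈ pc.2, P pc.1 → P c) →
      ∀ st : List String × Bool, (∀ x ∈ st.1, P x) → ∀ x ∈ (pvSweepF U items st).1, P x := by
  intro items
  induction items with
  | nil => intro _ st hst; simpa [pvSweepF] using hst
  | cons pc items ih =>
    intro hcl st hst
    have step : pvSweepF U (pc :: items) st = pvSweepF U items
        (if pc.1 ∈ st.1 then pvAddConsumers U st pc.2 else st) := rfl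
    rw [step]
    by_cases h : pc.1 ∈ st.1
    · rw [if_pos h]
      refine ih (fun pc' hpc' => hcl pc' (List.mem_cons_of_mem _ hpc')) _ ?_
      exact pvAddConsumers_sound U P pc.2 st
        (fun c hc => hcl pc List.mem_cons_self c hc (hst _ h)) hst
    · rw [if_neg h]
      exact ih (fun pc' hpc' => hcl pc' (List.mem_cons_of_mem _ hpc')) st hst

lemma pvSweepB_sound (U R : List String) (P : String → Prop) :
    ∀ items : List (String × List String),
      (∀ pc ∈ items, pc.1 ∈ R → (∃ c ∈ pc.2, P c) → P pc.1) →
      ∀ st : List String × Bool, (∀ x ∈ st.1, P x) → ∀ x ∈ (pvSweepB U items R st).1, P x := by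
  intro items
  induction items with
  | nil => intro _ st hst; simpa [pvSweepB] using hst
  | cons pc items ih =>
    intro hcl st hst
    have step : pvSweepB U (pc :: items) R st = pvSweepB U items R
        (if pc.1 ∈ U ∧ pc.1 ∈ R ∧ pc.1 ∉ st.1 ∧ pc.2.any (fun c => decide (c ∈ st.1)) then
          (st.1 ++ [pc.1], true) else st) := rfl
    rw [step]
    by_cases h : pc.1 ∈ U ∧ pc.1 ∈ R ∧ pc.1 ∉ st.1 ∧ pc.2.any (fun c => decide (c ∈ st.1)) = true
    · rw [if_pos h]
      obtain ⟨c, hc1, hc2⟩ := List.any_eq_true.mp h.2.2.2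
      have hP : P pc.1 := hcl pc List.mem_cons_self h.2.1 ⟨c, hc1, hst c (of_decide_eq_true hc2)⟩
      refine ih (fun pc' hpc' => hcl pc' (List.mem_cons_of_mem _ hpc')) _ ?_
      intro x hx
      rcases List.mem_append.mp hx with hx' | hx'
      · exact hst x hx'
      · simp at hx'; subst hx'; exact hP
    · rw [if_neg h]
      exact ih (fun pc' hpc' => hcl pc' (List.mem_cons_of_mem _ hpc')) st hst

-- An unchanged sweep means the state is closed under the adding rule.
lemma pvAddConsumers_closed (U : List String) (cs : List String) :
    ∀ st : List String × Bool, (pvAddConsumers U st cs).2 = false →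
      ∀ c ∈ cs, c ∈ U → c ∈ st.1 := by
  induction cs with
  | nil => intro st _ c hc; cases hc
  | cons c cs ih =>
    intro st hf
    have step : pvAddConsumers U st (c :: cs) = pvAddConsumers U
        (if c ∈ U ∧ c ∉ st.1 then (st.1 ++ [c], true) else st) cs := rfl
    rw [step] at hf
    by_cases h : c ∈ U ∧ c ∉ st.1
    · rw [if_pos h] at hf
      obtain ⟨ds, _, _, _, h4⟩ := pvAddConsumers_grow U cs (st.1 ++ [c], true)
      rw [h4] at hf
      simp at hf
    · rw [if_neg h] at hf
      intro c' hc' hU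
      rcases List.mem_cons.mp hc' with rfl | hc''
      · by_contra hn; exact h ⟨hU, hn⟩
      · exact ih st hf c' hc'' hU

lemma pvSweepF_closed (U : List String) :
    ∀ (items : List (String × List String)) (st : List String × Bool),
      (pvSweepF U items st).2 = false →
      ∀ pc ∈ items, pc.1 ∈ st.1 → ∀ c ∈ pc.2, c ∈ U → c ∈ st.1 := by
  intro items
  induction items with
  | nil => intro st _ pc hpc; cases hpc
  | cons pc items ih =>
    intro st hf
    have step : pvSweepF U (pc :: items) st = pvSweepF U items
        (if pc.1 ∈ st.1 then pvAddConsumers U st pc.2 else st) := rfl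
    rw [step] at hf
    by_cases h : pc.1 ∈ st.1
    · rw [if_pos h] at hf
      obtain ⟨ds2, k1, _, _, k4⟩ := pvSweepF_grow U items (pvAddConsumers U st pc.2)
      rw [k4] at hf
      have hsnd : (pvAddConsumers U st pc.2).2 = false := by
        cases hs : (pvAddConsumers U st pc.2).2 <;> simp [hs] at hf ⊢
      obtain ⟨ds1, g1, _, _, g4⟩ := pvAddConsumers_grow U pc.2 st
      have hsnd2 := hsnd
      rw [g4] at hsnd2
      have hds1 : ds1 = [] := by cases ds1 <;> simp_all
      have hfst : (pvAddConsumers U st pc.2).1 = st.1 := by rw [g1, hds1, List.append_nil]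
      intro pc' hpc' hmem c hc hU
      rcases List.mem_cons.mp hpc' with rfl | hpc''
      · exact pvAddConsumers_closed U pc'.2 st hsnd c hc hU
      · have := ih (pvAddConsumers U st pc.2) (by rw [k4]; exact hf) pc' hpc''
        rw [hfst] at this
        exact this hmem c hc hU
    · rw [if_neg h] at hf
      intro pc' hpc' hmem c hc hU
      rcases List.mem_cons.mp hpc' with rfl | hpc''
      · exact (h hmem).elim
      · exact ih st hf pc' hpc'' hmem c hc hU

lemma pvSweepB_closed (U R : List String) :
    ∀ (items : List (String × List String)) (st : List String × Bool),
      (pvSweepB U items R st).2 = false →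
      ∀ pc ∈ items, pc.1 ∈ U → pc.1 ∈ R → (∃ c ∈ pc.2, c ∈ st.1) → pc.1 ∈ st.1 := by
  intro items
  induction items with
  | nil => intro st _ pc hpc; cases hpc
  | cons pc items ih =>
    intro st hf
    have step : pvSweepB U (pc :: items) R st = pvSweepB U items R
        (if pc.1 ∈ U ∧ pc.1 ∈ R ∧ pc.1 ∉ st.1 ∧ pc.2.any (fun c => decide (c ∈ st.1)) then
          (st.1 ++ [pc.1], true) else st) := rfl
    rw [step] at hf
    by_cases h : pc.1 ∈ U ∧ pc.1 ∈ R ∧ pc.1 ∉ st.1 ∧ pc.2.any (fun c => decide (c ∈ st.1)) = true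
    · rw [if_pos h] at hf
      obtain ⟨ds, _, _, _, h4⟩ := pvSweepB_grow U items R (st.1 ++ [pc.1], true)
      rw [h4] at hf
      simp at hf
    · rw [if_neg h] at hf
      intro pc' hpc' hU hR hex
      rcases List.mem_cons.mp hpc' with rfl | hpc''
      · by_contra hn
        obtain ⟨c, hc1, hc2⟩ := hex
        exact h ⟨hU, hR, hn, List.any_eq_true.mpr ⟨c, hc1, decide_eq_true hc2⟩⟩
      · exact ih st hf pc' hpc'' hU hR hex
-- Saturation only grows the state, keeps it duplicate-free, stays sound, and its
-- result is closed under the sweep rule.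
lemma pvSatF_mono (U : List String) (items : List (String × List String)) :
    ∀ r x, x ∈ r → x ∈ pvSatF U items r := by
  intro r
  fun_induction pvSatF U items r with
  | case1 r h ih =>
    intro x hx
    obtain ⟨ds, h1, _, _, _⟩ := pvSweepF_grow U items (r, false)
    exact ih x (by rw [h1]; exact List.mem_append_left _ hx)
  | case2 r h =>
    intro x hx
    obtain ⟨ds, h1, _, _, _⟩ := pvSweepF_grow U items (r, false)
    rw [h1]; exact List.mem_append_left _ hx

lemma pvSatF_sound (U : List String) (items : List (String × List String)) (P : String → Prop)
    (hcl : ∀ pc ∈ items, ∀ c ∈ pc.2, P pc.1 → P c) :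
    ∀ r, (∀ x ∈ r, P x) → ∀ x ∈ pvSatF U items r, P x := by
  intro r
  fun_induction pvSatF U items r with
  | case1 r h ih =>
    intro hr
    exact ih (pvSweepF_sound U P items hcl (r, false) hr)
  | case2 r h =>
    intro hr
    exact pvSweepF_sound U P items hcl (r, false) hr

lemma pvSatF_closed (U : List String) (items : List (String × List String)) :
    ∀ r, ∀ pc ∈ items, pc.1 ∈ pvSatF U items r → ∀ c ∈ pc.2, c ∈ U → c ∈ pvSatF U items r := by
  intro r
  fun_induction pvSatF U items r with
  | case1 r h ih => exact ih
  | case2 r h =>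
    intro pc hpc hmem c hc hU
    obtain ⟨ds, h1, _, _, h4⟩ := pvSweepF_grow U items (r, false)
    have hsnd : (pvSweepF U items (r, false)).2 = false := by
      cases hs : (pvSweepF U items (r, false)).2
      · rfl
      · exact (h hs).elim
    have hds : ds = [] := by rw [h4] at hsnd; cases ds <;> simp_all
    have hfst : (pvSweepF U items (r, false)).1 = r := by rw [h1, hds, List.append_nil]
    rw [hfst] at hmem ⊢
    exact pvSweepF_closed U items (r, false) hsnd pc hpc hmem c hc hU

lemma pvSatB_mono (U : List String) (items : List (String × List String)) (R : List String) :
    ∀ r x, x ∈ r → x ∈ pvSatB U items R r := by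
  intro r
  fun_induction pvSatB U items R r with
  | case1 r h ih =>
    intro x hx
    obtain ⟨ds, h1, _, _, _⟩ := pvSweepB_grow U items R (r, false)
    exact ih x (by rw [h1]; exact List.mem_append_left _ hx)
  | case2 r h =>
    intro x hx
    obtain ⟨ds, h1, _, _, _⟩ := pvSweepB_grow U items R (r, false)
    rw [h1]; exact List.mem_append_left _ hx

lemma pvSatB_nodup (U : List String) (items : List (String × List String)) (R : List String) :
    ∀ r, r.Nodup → (pvSatB U items R r).Nodup := by
  intro r
  fun_induction pvSatB U items R r with
  | case1 r h ih =>
    intro hr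
    obtain ⟨ds, h1, h2, h3, _⟩ := pvSweepB_grow U items R (r, false)
    exact ih (by rw [h1]; exact List.Nodup.append hr h3 (fun x hx1 hx2 => (h2 x hx2).2 hx1))
  | case2 r h =>
    intro hr
    obtain ⟨ds, h1, h2, h3, _⟩ := pvSweepB_grow U items R (r, false)
    rw [h1]; exact List.Nodup.append hr h3 (fun x hx1 hx2 => (h2 x hx2).2 hx1)

lemma pvSatB_sound (U : List String) (items : List (String × List String)) (R : List String)
    (P : String → Prop) (hcl : ∀ pc ∈ items, pc.1 ∈ R → (∃ c ∈ pc.2, P c) → P pc.1) :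
    ∀ r, (∀ x ∈ r, P x) → ∀ x ∈ pvSatB U items R r, P x := by
  intro r
  fun_induction pvSatB U items R r with
  | case1 r h ih =>
    intro hr
    exact ih (pvSweepB_sound U R P items hcl (r, false) hr)
  | case2 r h =>
    intro hr
    exact pvSweepB_sound U R P items hcl (r, false) hr

lemma pvSatB_closed (U : List String) (items : List (String × List String)) (R : List String) :
    ∀ r, ∀ pc ∈ items, pc.1 ∈ U → pc.1 ∈ R → (∃ c ∈ pc.2, c ∈ pvSatB U items R r) →
      pc.1 ∈ pvSatB U items R r := by
  intro r
  fun_induction pvSatB U items R r with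
  | case1 r h ih => exact ih
  | case2 r h =>
    intro pc hpc hU hR hex
    obtain ⟨ds, h1, _, _, h4⟩ := pvSweepB_grow U items R (r, false)
    have hsnd : (pvSweepB U items R (r, false)).2 = false := by
      cases hs : (pvSweepB U items R (r, false)).2
      · rfl
      · exact (h hs).elim
    have hds : ds = [] := by rw [h4] at hsnd; cases ds <;> simp_all
    have hfst : (pvSweepB U items R (r, false)).1 = r := by rw [h1, hds, List.append_nil]
    rw [hfst] at hex ⊢
    exact pvSweepB_closed U R items (r, false) hsnd pc hpc hU hR hex
-- B's forward fixpoint computes exactly the reachable nodes.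
lemma pvBFwd (adjacency : List (String × List String)) (start_nodes end_nodes : List String)
    (x : String) :
    x ∈ pvSatF (pvU adjacency start_nodes end_nodes) (PySem.Dict.ofList adjacency).items
        (PySem.Set.ofList start_nodes) ↔
      pvReachF (PySem.Dict.ofList adjacency) start_nodes x := by
  constructor
  · intro h
    refine pvSatF_sound _ _ (pvReachF (PySem.Dict.ofList adjacency) start_nodes) ?_ _ ?_ x h
    · intro pc hpc c hc hp
      refine pvReachF.step pc.1 c hp ?_
      rw [PySem.Dict.getD_of_mem_items _ hpc (PySem.Dict.nodup_keys_ofList adjacency) []]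
      exact hc
    · intro z hz
      exact pvReachF.base z ((PySem.Set.mem_ofList start_nodes z).mp hz)
  · intro h
    induction h with
    | base z hz =>
      exact pvSatF_mono _ _ _ z ((PySem.Set.mem_ofList start_nodes z).mpr hz)
    | step p c hp hc ih =>
      obtain ⟨cs, hmem, hcc⟩ := (pvMemGetD_iff adjacency p c).mp hc
      exact pvSatF_closed _ _ _ (p, cs) hmem ih c hcc
        ((pvU_item (start_nodes := start_nodes) (end_nodes := end_nodes) hmem).2 c hcc)

-- B's backward fixpoint computes exactly the R-backward-reachable nodes.
lemma pvBBwd (adjacency : List (String × List String)) (start_nodes end_nodes : List String)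
    (R : List String) (x : String) :
    x ∈ pvSatB (pvU adjacency start_nodes end_nodes) (PySem.Dict.ofList adjacency).items R
        (PySem.Set.ofList (end_nodes.filter (fun e => decide (e ∈ R)))) ↔
      pvReachB (PySem.Dict.ofList adjacency) R end_nodes x := by
  constructor
  · intro h
    refine pvSatB_sound _ _ _ (pvReachB (PySem.Dict.ofList adjacency) R end_nodes) ?_ _ ?_ x h
    · rintro pc hpc hR ⟨c, hc, hP⟩
      refine pvReachB.step pc.1 c hP hR ?_
      rw [PySem.Dict.getD_of_mem_items _ hpc (PySem.Dict.nodup_keys_ofList adjacency) []]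
      exact hc
    · intro z hz
      rw [PySem.Set.mem_ofList] at hz
      rw [List.mem_filter] at hz
      exact pvReachB.base z hz.1 (of_decide_eq_true hz.2)
  · intro h
    induction h with
    | base z hz hr =>
      refine pvSatB_mono _ _ _ _ z ?_
      rw [PySem.Set.mem_ofList, List.mem_filter]
      exact ⟨hz, decide_eq_true hr⟩
    | step p c hc hp he ih =>
      obtain ⟨cs, hmem, hcc⟩ := (pvMemGetD_iff adjacency p c).mp he
      exact pvSatB_closed _ _ _ _ (p, cs) hmem
        (pvU_item (start_nodes := start_nodes) (end_nodes := end_nodes) hmem).1 hp ⟨c, hcc, ih⟩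
-- ===== VERDICT (by name: the statement is the Claim_ definition above) =====
theorem collect_path_nodes_py_spec : Claim_equal_collect_path_nodes_py := by
  intro adjacency start_nodes end_nodes _hdom _hpre
  unfold Spec_collect_path_nodes_py collect_path_nodes_py collect_path_nodes_py_alt
  rw [PySem.List.sorted_id_eq_sorted_id_iff_perm]
  have hAB : ∀ y, y ∈ pvQueueBFS (pvU adjacency start_nodes end_nodes)
      (fun c => (PySem.Dict.ofList adjacency).getD c []) (fun _ => true) start_nodes [] ↔
      y ∈ pvSatF (pvU adjacency start_nodes end_nodes) (PySem.Dict.ofList adjacency).items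
        (PySem.Set.ofList start_nodes) := fun y =>
    (pvAFwd adjacency start_nodes end_nodes y).trans
      (pvBFwd adjacency start_nodes end_nodes y).symm
  refine (List.perm_ext_iff_of_nodup (pvQueue_nodup _ _ _ _ _)
    (pvSatB_nodup _ _ _ _ (PySem.Set.nodup_ofList _))).mpr ?_
  intro t
  rw [pvABwd adjacency start_nodes end_nodes _ t,
      pvBBwd adjacency start_nodes end_nodes _ t]
  exact ⟨pvReachB_congr hAB, pvReachB_congr (fun y => (hAB y).symm)⟩
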